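-- pv_equiv track=rewrite | github.com/I-am-ai-programmer123/AI-hakaton-best | andrzej/warcaby/minimax_algorithm.py | whiteCapture
-- ===== SOURCE A (Python) =====
-- from copy import deepcopy
--
-- def whiteCapture(position, wPos, bPos):
--     nextMoves = []
--     nextPos = [2*bPos[0] - wPos[0], 2*bPos[1] - wPos[1]]
--     if nextPos[0] >= 0 and nextPos[0] < len(position) and nextPos[1] >= 0 and nextPos[1] < len(position[0]):
--         if position[nextPos[0]][nextPos[1]] == '.':
--             position[bPos[0]][bPos[1]] = '.'
--             position[wPos[0]][wPos[1]] = '.'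
--             position[nextPos[0]][nextPos[1]] = 'w'
--             if nextPos[0] == len(position)-1:
--                 position[nextPos[0]][nextPos[1]] = 'W'
--         else:
--             return nextMoves
--     else:
--         return nextMoves
--
--     y = nextPos[0]
--     x = nextPos[1]
--     if (y+1 < len(position) and x-1 >= 0) and (position[y+1][x-1] == 'b' or position[y+1][x-1] == 'B'):
--         nextMoves += whiteCapture(deepcopy(position), [y, x], [y+1, x-1])
--     if (y+1 < len(position) and x+1 < len(position[0])) and (position[y+1][x+1] == 'b' or position[y+1][x+1] == 'B'):
--         nextMoves += whiteCapture(deepcopy(position), [y, x], [y+1, x+1])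
--     else:
--         nextMoves.append(position)
--
--     return nextMoves
-- ===== SOURCE B (Python) =====
-- def whiteCapture(position, wPos, bPos):
--     # Iterative worklist (explicit DFS task stack) instead of recursion.
--     # Like A, mutates the caller's `position` in place when the first jump is valid.
--     results = []
--     tasks = [("explore", position, wPos, bPos)]
--     while tasks:
--         t = tasks.pop()
--         if t[0] == "emit":
--             results.append(t[1])
--             continue
--         _, board, w, b = t
--         ly, lx = 2 * b[0] - w[0], 2 * b[1] - w[1]
--         if not (0 <= ly < len(board) and 0 <= lx < len(board[0])):
--             continue
--         if board[ly][lx] != '.':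
--             continue
--         board[b[0]][b[1]] = '.'
--         board[w[0]][w[1]] = '.'
--         board[ly][lx] = 'W' if ly == len(board) - 1 else 'w'
--         new = []
--         if ly + 1 < len(board) and lx - 1 >= 0 and board[ly + 1][lx - 1] in ('b', 'B'):
--             new.append(("explore", [row[:] for row in board], [ly, lx], [ly + 1, lx - 1]))
--         if ly + 1 < len(board) and lx + 1 < len(board[0]) and board[ly + 1][lx + 1] in ('b', 'B'):
--             new.append(("explore", [row[:] for row in board], [ly, lx], [ly + 1, lx + 1]))
--         else:
--             new.append(("emit", board))
--         tasks.extend(reversed(new))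
--     return results
-- ===== Notes on version B (the rewrite author's own statement) =====
-- stated objective: alternative
-- what changed: Replaces A's recursion (one recursive call per jump, deepcopy per call) by an explicit iterative DFS worklist: a stack of explore/emit task frames popped in a while loop, pushing continuation frames in reverse so A's depth-first result order is preserved.
import Mathlib
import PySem

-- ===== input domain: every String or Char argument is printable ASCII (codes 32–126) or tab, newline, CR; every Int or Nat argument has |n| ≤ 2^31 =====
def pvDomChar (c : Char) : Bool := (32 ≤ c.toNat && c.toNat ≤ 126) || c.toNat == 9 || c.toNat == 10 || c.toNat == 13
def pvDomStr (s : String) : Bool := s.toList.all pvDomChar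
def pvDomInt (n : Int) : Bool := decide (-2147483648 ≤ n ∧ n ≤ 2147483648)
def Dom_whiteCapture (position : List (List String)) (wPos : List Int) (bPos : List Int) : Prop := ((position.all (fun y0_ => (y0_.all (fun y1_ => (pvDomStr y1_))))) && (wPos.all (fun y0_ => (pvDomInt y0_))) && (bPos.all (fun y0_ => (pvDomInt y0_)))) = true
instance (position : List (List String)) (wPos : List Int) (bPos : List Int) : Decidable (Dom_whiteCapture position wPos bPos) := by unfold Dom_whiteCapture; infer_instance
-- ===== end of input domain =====

-- B replaces A's recursion by an explicit iterative DFS worklist of explore/emit tasks (same results, same order);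
-- both A and B mutate the caller's `position` in place in Python — the equivalence proved here is about the RETURN value.

-- ===== PORT A =====
-- shared low-level primitives (Python 2-D read / in-place 2-D write, negative indices wrap as in Python;
-- an out-of-range write would RAISE in Python and is excluded by Pre_, pvSet2 is a no-op there)
def pvCell (p : List (List String)) (i j : Int) : Option String :=
  (PySem.List.pyGet? p i).bind (fun r => PySem.List.pyGet? r j)

def pvSet2 (p : List (List String)) (i j : Int) (v : String) : List (List String) :=
  PySem.List.pySetD p i (PySem.List.pySetD (PySem.List.pyGetD p i []) j v)

-- number of black pieces on the board; used only as a fuel bound (every nested capture removes one 'b'/'B',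
-- so `pvBlackCount position + 2` fuel is never exhausted on the inputs Python terminates on)
def pvBlackCount (p : List (List String)) : Nat :=
  (p.map (fun r => r.countP (fun c => c == "b" || c == "B"))).sum

-- literal transliteration of A's recursion, with a fuel counter as totality guard.
-- Python mutates `position` in place, so len(position) / len(position[0]) are constant through the call:
-- the port reads those lengths from the original `position`.
def whiteCaptureF : Nat → List (List String) → List Int → List Int → List (List (List String))
  | 0, _, _, _ => []
  | f+1, position, wPos, bPos =>
    let w0 := PySem.List.pyGetD wPos 0 0
    let w1 := PySem.List.pyGetD wPos 1 0
    let b0 := PySem.List.pyGetD bPos 0 0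
    let b1 := PySem.List.pyGetD bPos 1 0
    let ny := 2*b0 - w0
    let nx := 2*b1 - w1
    let H : Int := position.length
    let W : Int := (position.headD []).length
    if 0 ≤ ny ∧ ny < H ∧ 0 ≤ nx ∧ nx < W then
      if pvCell position ny nx = some "." then
        let p1 := pvSet2 position b0 b1 "."
        let p2 := pvSet2 p1 w0 w1 "."
        let p3 := pvSet2 p2 ny nx "w"
        let p4 := if ny = H - 1 then pvSet2 p3 ny nx "W" else p3
        let left :=
          if (ny+1 < H ∧ 0 ≤ nx-1) ∧ (pvCell p4 (ny+1) (nx-1) = some "b" ∨ pvCell p4 (ny+1) (nx-1) = some "B")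
          then whiteCaptureF f p4 [ny, nx] [ny+1, nx-1] else []
        if (ny+1 < H ∧ nx+1 < W) ∧ (pvCell p4 (ny+1) (nx+1) = some "b" ∨ pvCell p4 (ny+1) (nx+1) = some "B")
        then left ++ whiteCaptureF f p4 [ny, nx] [ny+1, nx+1]
        else left ++ [p4]
      else []
    else []

def whiteCapture (position : List (List String)) (wPos : List Int) (bPos : List Int) : List (List (List String)) :=
  whiteCaptureF (pvBlackCount position + 2) position wPos bPos

-- ===== PORT B =====
-- B's worklist entries: a pending capture attempt, or a finished board to emit
inductive PvTask where
  | explore : Nat → List (List String) → List Int → List Int → PvTask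
  | emit : List (List String) → PvTask
deriving DecidableEq, Repr

-- processing of one popped explore frame: the (≤ 2) tasks it pushes, in DFS order
def pvStep (f : Nat) (board : List (List String)) (w b : List Int) : List PvTask :=
  let w0 := PySem.List.pyGetD w 0 0
  let w1 := PySem.List.pyGetD w 1 0
  let b0 := PySem.List.pyGetD b 0 0
  let b1 := PySem.List.pyGetD b 1 0
  let ly := 2*b0 - w0
  let lx := 2*b1 - w1
  let H : Int := board.length
  let W : Int := (board.headD []).length
  if 0 ≤ ly ∧ ly < H ∧ 0 ≤ lx ∧ lx < W then
    if pvCell board ly lx = some "." then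
      let q1 := pvSet2 board b0 b1 "."
      let q2 := pvSet2 q1 w0 w1 "."
      let q3 := pvSet2 q2 ly lx (if ly = H - 1 then "W" else "w")
      (if (ly+1 < H ∧ 0 ≤ lx-1) ∧ (pvCell q3 (ly+1) (lx-1) = some "b" ∨ pvCell q3 (ly+1) (lx-1) = some "B")
       then [PvTask.explore f q3 [ly, lx] [ly+1, lx-1]] else [])
      ++ (if (ly+1 < H ∧ lx+1 < W) ∧ (pvCell q3 (ly+1) (lx+1) = some "b" ∨ pvCell q3 (ly+1) (lx+1) = some "B")
          then [PvTask.explore f q3 [ly, lx] [ly+1, lx+1]] else [PvTask.emit q3])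
    else []
  else []

-- the worklist loop (B's `while tasks:`), structural recursion on a gas counter (totality guard only:
-- the weight measure sum shrinks every iteration, so the initial gas below is never exhausted)
def pvRunGas : Nat → List PvTask → List (List (List String))
  | _, [] => []
  | 0, _ :: _ => []
  | g+1, PvTask.emit bo :: rest => bo :: pvRunGas g rest
  | g+1, PvTask.explore 0 _ _ _ :: rest => pvRunGas g rest
  | g+1, PvTask.explore (f+1) board w b :: rest => pvRunGas g (pvStep f board w b ++ rest)

def whiteCapture_alt (position : List (List String)) (wPos : List Int) (bPos : List Int) : List (List (List String)) :=
  pvRunGas (3 ^ (pvBlackCount position + 3)) [PvTask.explore (pvBlackCount position + 2) position wPos bPos]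

-- ===== PRECONDITION & SPEC =====
-- Pre_ excludes the inputs on which Python A raises IndexError: wPos/bPos with fewer than 2 entries, and —
-- when the first landing square is on the board — ragged boards (rows of unequal length, which a later jump can
-- index past) and wPos/bPos entries that are not valid Python indices for the in-place writes; a few ragged
-- boards whose short rows are never visited do return in A and are excluded with them (see cites).
def Pre_whiteCapture (position : List (List String)) (wPos : List Int) (bPos : List Int) : Prop :=
  2 ≤ wPos.length ∧ 2 ≤ bPos.length ∧
  (let w0 := wPos.getD 0 0
   let w1 := wPos.getD 1 0
   let b0 := bPos.getD 0 0
   let b1 := bPos.getD 1 0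
   let H : Int := position.length
   let W : Int := (position.headD []).length
   (0 ≤ 2*b0 - w0 ∧ 2*b0 - w0 < H ∧ 0 ≤ 2*b1 - w1 ∧ 2*b1 - w1 < W) →
     ((∀ row ∈ position, (row.length : Int) = W) ∧
      -H ≤ w0 ∧ w0 < H ∧ -W ≤ w1 ∧ w1 < W ∧ -H ≤ b0 ∧ b0 < H ∧ -W ≤ b1 ∧ b1 < W))
instance (position : List (List String)) (wPos : List Int) (bPos : List Int) : Decidable (Pre_whiteCapture position wPos bPos) := by unfold Pre_whiteCapture; infer_instance

def pvWitness_whiteCapture : List (List String) × List Int × List Int :=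
  ([[".", ".", "."], [".", "b", "."], [".", ".", "."]], [0, 0], [1, 1])

def Spec_whiteCapture (position : List (List String)) (wPos : List Int) (bPos : List Int) (out : List (List (List String))) : Prop := out = whiteCapture_alt position wPos bPos
instance (position : List (List String)) (wPos : List Int) (bPos : List Int) (out : List (List (List String))) : Decidable (Spec_whiteCapture position wPos bPos out) := by unfold Spec_whiteCapture; infer_instance

-- ===== CLAIM (what is proved, stated in full; the proofs are below) =====
def Claim_equal_whiteCapture : Prop := ∀ (position : List (List String)) (wPos : List Int) (bPos : List Int), Dom_whiteCapture position wPos bPos → Pre_whiteCapture position wPos bPos → Spec_whiteCapture position wPos bPos (whiteCapture position wPos bPos)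

-- ===== LEMMAS AND PROOFS =====

-- writing the same Python cell twice keeps only the second value
theorem pvIdx_lt (n : Nat) (i : Int) (k : Nat) (h : PySem.List.pyIdx? n i = some k) : k < n := by
  simp only [PySem.List.pyIdx?] at h
  split_ifs at h <;> simp_all <;> omega

theorem pySetD_same {α : Type} (xs : List α) (i : Int) (v u : α) :
    PySem.List.pySetD (PySem.List.pySetD xs i v) i u = PySem.List.pySetD xs i u := by
  cases h : PySem.List.pyIdx? xs.length i with
  | none =>
    have hv : PySem.List.pySetD xs i v = xs := by
      simp [PySem.List.pySetD, PySem.List.pySet?, h]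
    rw [hv]
  | some k =>
    have hv : PySem.List.pySetD xs i v = xs.set k v := by
      simp [PySem.List.pySetD, PySem.List.pySet?, h]
    have hu : PySem.List.pySetD xs i u = xs.set k u := by
      simp [PySem.List.pySetD, PySem.List.pySet?, h]
    rw [hv, hu]
    simp only [PySem.List.pySetD, PySem.List.pySet?, List.length_set, h]
    simp [List.set_set]

theorem pvSet2_same (p : List (List String)) (i j : Int) (v u : String) :
    pvSet2 (pvSet2 p i j v) i j u = pvSet2 p i j u := by
  cases h : PySem.List.pyIdx? p.length i with
  | none =>
    have hv : pvSet2 p i j v = p := by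
      simp [pvSet2, PySem.List.pySetD, PySem.List.pySet?, h]
    rw [hv]
  | some k =>
    have hk : k < p.length := pvIdx_lt _ _ _ h
    have hstep : ∀ (Y : List (List String)) (x : String), PySem.List.pyIdx? Y.length i = some k →
        pvSet2 Y i j x = Y.set k (PySem.List.pySetD (PySem.List.pyGetD Y i []) j x) := by
      intro Y x hY
      simp [pvSet2, PySem.List.pySetD, PySem.List.pySet?, hY]
    have hv := hstep p v h
    have hu := hstep p u h
    have h2 : PySem.List.pyIdx? (pvSet2 p i j v).length i = some k := by
      rw [hv, List.length_set]; exact h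
    have hget : PySem.List.pyGetD
        (p.set k (PySem.List.pySetD (PySem.List.pyGetD p i []) j v)) i []
        = PySem.List.pySetD (PySem.List.pyGetD p i []) j v := by
      simp only [PySem.List.pyGetD, PySem.List.pyGet?, List.length_set, h]
      simp [List.getElem?_set_self hk]
    rw [hstep _ u h2, hv, hget, pySetD_same, List.set_set, hu]

-- the A-side promoted board equals the B-side single conditional write
theorem pvPromo_eq (p : List (List String)) (i j : Int) (c : Prop) [Decidable c] :
    (if c then pvSet2 (pvSet2 p i j "w") i j "W" else pvSet2 p i j "w")
      = pvSet2 p i j (if c then "W" else "w") := by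
  split_ifs with h
  · exact pvSet2_same p i j "w" "W"
  · rfl

-- weight measure on worklists: it shrinks at every loop iteration, so the initial gas in
-- whiteCapture_alt is never exhausted (pvRunGas_irrel below absorbs the exact gas value)
def pvWeight : PvTask → Nat
  | .explore f _ _ _ => 3^(f+1)
  | .emit _ => 1

-- termination bound for the worklist loop (cited by pvRun's decreasing_by)
theorem pvStep_weight (f : Nat) (board : List (List String)) (w b : List Int) :
    ((pvStep f board w b).map pvWeight).sum < 3^(f+2) := by
  have h1 : 1 ≤ (3:Nat)^(f+1) := Nat.one_le_pow _ _ (by norm_num)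
  have h3 : (3:Nat)^(f+2) = 3 * 3^(f+1) := by ring
  simp only [pvStep]
  split_ifs <;> simp [pvWeight] <;> omega


-- proof-only: the loop run with gas equal to the worklist's weight measure
def pvMeasure (ts : List PvTask) : Nat := (ts.map pvWeight).sum

def pvRunT (ts : List PvTask) : List (List (List String)) := pvRunGas (pvMeasure ts) ts

theorem pvMeasure_append (a b : List PvTask) : pvMeasure (a ++ b) = pvMeasure a + pvMeasure b := by
  simp [pvMeasure]

-- any two sufficient gas values run the worklist to the same result
theorem pvRunGas_irrel : ∀ (g g' : Nat) (ts : List PvTask),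
    pvMeasure ts ≤ g → pvMeasure ts ≤ g' → pvRunGas g ts = pvRunGas g' ts := by
  intro g
  induction g using Nat.strong_induction_on with
  | _ g ih =>
    intro g' ts hg hg'
    match ts with
    | [] => cases g <;> cases g' <;> rfl
    | t :: rest =>
      have hw1 : 1 ≤ pvWeight t := by
        cases t <;> first | exact le_refl _ | exact Nat.one_le_pow _ _ (by norm_num)
      have hμ : pvMeasure (t :: rest) = pvWeight t + pvMeasure rest := by simp [pvMeasure]
      obtain ⟨g0, rfl⟩ : ∃ g0, g = g0 + 1 := ⟨g - 1, by omega⟩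
      obtain ⟨g0', rfl⟩ : ∃ g0', g' = g0' + 1 := ⟨g' - 1, by omega⟩
      match t with
      | PvTask.emit bo =>
        have hr : pvMeasure rest ≤ g0 := by simp [pvWeight] at hμ; omega
        have hr' : pvMeasure rest ≤ g0' := by simp [pvWeight] at hμ; omega
        simp only [pvRunGas]
        rw [ih g0 (by omega) g0' rest hr hr']
      | PvTask.explore 0 p w b =>
        have hw : pvWeight (PvTask.explore 0 p w b) = 3 := by norm_num [pvWeight]
        have hr : pvMeasure rest ≤ g0 := by omega
        have hr' : pvMeasure rest ≤ g0' := by omega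
        simp only [pvRunGas]
        exact ih g0 (by omega) g0' rest hr hr'
      | PvTask.explore (f+1) p w b =>
        have hs := pvStep_weight f p w b
        have hww : pvWeight (PvTask.explore (f+1) p w b) = 3^(f+2) := rfl
        have hr : pvMeasure (pvStep f p w b ++ rest) ≤ g0 := by
          rw [pvMeasure_append]
          have : pvMeasure (pvStep f p w b) < 3^(f+2) := hs
          omega
        have hr' : pvMeasure (pvStep f p w b ++ rest) ≤ g0' := by
          rw [pvMeasure_append]
          have : pvMeasure (pvStep f p w b) < 3^(f+2) := hs
          omega
        simp only [pvRunGas]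
        exact ih g0 (by omega) g0' _ hr hr'

theorem pvRunT_nil : pvRunT [] = [] := rfl

theorem pvRunT_emit (bo : List (List String)) (rest : List PvTask) :
    pvRunT (PvTask.emit bo :: rest) = bo :: pvRunT rest := by
  have hμ : pvMeasure (PvTask.emit bo :: rest) = pvMeasure rest + 1 := by
    simp [pvMeasure, pvWeight]; omega
  rw [pvRunT, hμ]
  simp only [pvRunGas]
  rfl

-- the worklist processes an explore frame exactly as A's recursive call does, in the same order
theorem pvRunT_explore (f : Nat) :
    ∀ (p : List (List String)) (w b : List Int) (rest : List PvTask),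
      pvRunT (PvTask.explore f p w b :: rest) = whiteCaptureF f p w b ++ pvRunT rest := by
  induction f with
  | zero =>
    intro p w b rest
    have hμ : pvMeasure (PvTask.explore 0 p w b :: rest) = (pvMeasure rest + 2) + 1 := by
      simp [pvMeasure, pvWeight]; omega
    rw [pvRunT, hμ]
    simp only [pvRunGas]
    rw [pvRunGas_irrel (pvMeasure rest + 2) (pvMeasure rest) rest (by omega) le_rfl]
    simp [whiteCaptureF, pvRunT]
  | succ f ih =>
    intro p w b rest
    have hw : pvWeight (PvTask.explore (f+1) p w b) = 3^(f+2) := rfl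
    have h1 : 1 ≤ (3:Nat)^(f+2) := Nat.one_le_pow _ _ (by norm_num)
    have hμ : pvMeasure (PvTask.explore (f+1) p w b :: rest)
        = (3^(f+2) + pvMeasure rest - 1) + 1 := by
      simp only [pvMeasure, List.map_cons, List.sum_cons]
      rw [show pvWeight (PvTask.explore (f+1) p w b) = 3^(f+2) from rfl]
      omega
    have hs : pvMeasure (pvStep f p w b) < 3^(f+2) := pvStep_weight f p w b
    have hle : pvMeasure (pvStep f p w b ++ rest) ≤ 3^(f+2) + pvMeasure rest - 1 := by
      rw [pvMeasure_append]; omega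
    rw [pvRunT, hμ]
    simp only [pvRunGas]
    rw [pvRunGas_irrel _ (pvMeasure (pvStep f p w b ++ rest)) _ hle le_rfl]
    show pvRunT (pvStep f p w b ++ rest) = _
    simp only [pvStep, whiteCaptureF, pvPromo_eq]
    split_ifs <;>
      simp only [List.append_assoc, List.nil_append, List.cons_append] <;>
      (try rw [ih]) <;> (try rw [ih]) <;> (try rw [pvRunT_emit])

-- ===== VERDICT (by name: the statement is the Claim_ definition above) =====
theorem whiteCapture_spec : Claim_equal_whiteCapture := by
  intro position wPos bPos _ _
  show whiteCapture position wPos bPos = whiteCapture_alt position wPos bPos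
  have halt : whiteCapture_alt position wPos bPos
      = pvRunT [PvTask.explore (pvBlackCount position + 2) position wPos bPos] := rfl
  rw [whiteCapture, halt, pvRunT_explore]
  simp [pvRunT_nil]
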